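-- pv_equiv track=rewrite | github.com/Abelliuxl/weauto | carlibrate_unread_badge_ui.py | _upsert_section
-- ===== SOURCE A (Python) =====
-- def _upsert_section(text: str, section: str, items: list[tuple[str, str]]) -> str:
--     lines = text.splitlines()
--     hdr = f"[{section}]"
--     start = -1
--     end = -1
--     for i, line in enumerate(lines):
--         if line.strip() == hdr:
--             start = i
--             j = i + 1
--             while j < len(lines) and not lines[j].strip().startswith("["):
--                 j += 1
--             end = j
--             break
--     block = [hdr] + [f"{k} = {v}" for k, v in items]
--     if start >= 0:
--         lines = lines[:start] + block + lines[end:]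
--     else:
--         if lines and lines[-1].strip():
--             lines.append("")
--         lines.extend(block)
--     out = "\n".join(lines)
--     if text.endswith("\n"):
--         out += "\n"
--     return out
-- ===== SOURCE B (Python) =====
-- def _upsert_section(text: str, section: str, items: list[tuple[str, str]]) -> str:
--     hdr = f"[{section}]"
--     block = [hdr] + [f"{k} = {v}" for k, v in items]
--     out_lines = []
--     inserted = False
--     in_section = False
--     for line in text.splitlines():
--         if in_section:
--             if line.strip().startswith("["):
--                 in_section = False
--                 out_lines.append(line)
--             continue
--         if not inserted and line.strip() == hdr:
--             out_lines.extend(block)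
--             inserted = True
--             in_section = True
--         else:
--             out_lines.append(line)
--     if not inserted:
--         if out_lines and out_lines[-1].strip():
--             out_lines.append("")
--         out_lines.extend(block)
--     out = "\n".join(out_lines)
--     if text.endswith("\n"):
--         out += "\n"
--     return out
-- ===== Notes on version B (the rewrite author's own statement) =====
-- stated objective: alternative
-- what changed: Replaced the find-header-index-then-while-scan-then-slice-and-splice approach with a single streaming pass over the lines that maintains inserted/in_section flags, emitting the new block in place of the old section as it goes.
import Mathlib
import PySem

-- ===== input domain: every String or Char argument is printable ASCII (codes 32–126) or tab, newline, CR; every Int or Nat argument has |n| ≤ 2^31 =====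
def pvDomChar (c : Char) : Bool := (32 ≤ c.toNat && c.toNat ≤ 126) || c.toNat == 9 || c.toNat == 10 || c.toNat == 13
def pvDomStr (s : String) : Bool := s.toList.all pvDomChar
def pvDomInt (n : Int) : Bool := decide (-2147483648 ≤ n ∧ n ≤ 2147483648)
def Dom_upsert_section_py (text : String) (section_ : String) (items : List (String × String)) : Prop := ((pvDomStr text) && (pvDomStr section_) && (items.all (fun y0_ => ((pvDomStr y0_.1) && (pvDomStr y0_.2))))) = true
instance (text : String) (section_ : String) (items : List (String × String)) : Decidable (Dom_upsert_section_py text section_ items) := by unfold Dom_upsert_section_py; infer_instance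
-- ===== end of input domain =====

-- B replaces A's find-indices-then-slice with one streaming pass over the lines
-- using inserted/in_section flags (objective: alternative; same linear cost).

-- ===== PORT A =====
-- the 'while j < len(lines) and not lines[j].strip().startswith("[")' loop
def pvWEnd (lines : List String) (j : Nat) : Nat :=
  if h : j < lines.length then
    if (PySem.Str.startswith (PySem.Str.strip lines[j]) "[") then j else pvWEnd lines (j + 1)
  else j
termination_by lines.length - j

-- the 'for i, line in enumerate(lines)' search with break; called with (lines, 0)
def pvFindA (lines : List String) (hdr : String) : List String → Nat → Option (Nat × Nat)
  | [], _ => none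
  | line :: rest, i =>
    if PySem.Str.strip line == hdr then some (i, pvWEnd lines (i + 1))
    else pvFindA lines hdr rest (i + 1)

def upsert_section_py (text : String) (section_ : String) (items : List (String × String)) : String :=
  let lines := PySem.Str.splitlines text
  let hdr := "[" ++ section_ ++ "]"
  let block := hdr :: items.map (fun kv => kv.1 ++ " = " ++ kv.2)
  let lines' :=
    match pvFindA lines hdr lines 0 with
    | some (s, e) => lines.take s ++ block ++ lines.drop e  -- slices: indices are ≥ 0 here, take/drop exact
    | none =>
      (match lines.getLast? with  -- 'if lines and lines[-1].strip():'
       | some last => if PySem.Str.strip last ≠ "" then lines ++ [""] else lines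
       | none => lines) ++ block
  let out := PySem.Str.join "\n" lines'
  if PySem.Str.endswith text "\n" then out ++ "\n" else out

-- ===== PORT B =====
-- the streaming loop; returns (out_lines, inserted)
def pvScanB (hdr : String) (block : List String) : List String → Bool → Bool → List String × Bool
  | [], _, inserted => ([], inserted)
  | l :: rest, inSec, inserted =>
    if inSec then
      if (PySem.Str.startswith (PySem.Str.strip l) "[") then
        let r := pvScanB hdr block rest false inserted
        (l :: r.1, r.2)
      else
        pvScanB hdr block rest true inserted
    else if !inserted && (PySem.Str.strip l == hdr) then
      let r := pvScanB hdr block rest true true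
      (block ++ r.1, r.2)
    else
      let r := pvScanB hdr block rest false inserted
      (l :: r.1, r.2)

def upsert_section_py_alt (text : String) (section_ : String) (items : List (String × String)) : String :=
  let hdr := "[" ++ section_ ++ "]"
  let block := hdr :: items.map (fun kv => kv.1 ++ " = " ++ kv.2)
  let r := pvScanB hdr block (PySem.Str.splitlines text) false false
  let lines' :=
    if r.2 then r.1
    else
      (match r.1.getLast? with
       | some last => if PySem.Str.strip last ≠ "" then r.1 ++ [""] else r.1
       | none => r.1) ++ block
  let out := PySem.Str.join "\n" lines'
  if PySem.Str.endswith text "\n" then out ++ "\n" else out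

-- ===== PRECONDITION & SPEC =====
def Spec_upsert_section_py (text : String) (section_ : String) (items : List (String × String)) (out : String) : Prop := out = upsert_section_py_alt text section_ items
instance (text : String) (section_ : String) (items : List (String × String)) (out : String) : Decidable (Spec_upsert_section_py text section_ items out) := by unfold Spec_upsert_section_py; infer_instance

-- ===== CLAIM (what is proved, stated in full; the proofs are below) =====
def Claim_equal_upsert_section_py : Prop := ∀ (text : String) (section_ : String) (items : List (String × String)), Dom_upsert_section_py text section_ items → Spec_upsert_section_py text section_ items (upsert_section_py text section_ items)

-- ===== LEMMAS AND PROOFS =====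

theorem pvWEnd_drop (lines : List String) (j : Nat) :
    lines.drop (pvWEnd lines j) =
      (lines.drop j).dropWhile (fun l => !(PySem.Str.startswith (PySem.Str.strip l) "[")) := by
  unfold pvWEnd
  split
  · next h =>
    rw [List.drop_eq_getElem_cons h, List.dropWhile_cons]
    by_cases hq : (PySem.Str.startswith (PySem.Str.strip lines[j]) "[") = true
    · rw [if_pos hq]
      simp only [hq, Bool.not_true, Bool.false_eq_true, if_false]
      exact List.drop_eq_getElem_cons h
    · rw [if_neg hq]
      simp only [eq_false_of_ne_true hq, Bool.not_false, if_true]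
      exact pvWEnd_drop lines (j + 1)
  · next h =>
    simp [List.drop_eq_nil_of_le (le_of_not_gt h)]
termination_by lines.length - j

theorem pvFindA_drop (lines : List String) (hdr : String) (i : Nat) :
    pvFindA lines hdr (lines.drop i) i =
      ((lines.drop i).findIdx? (fun l => PySem.Str.strip l == hdr)).map
        (fun t => (i + t, pvWEnd lines (i + t + 1))) := by
  by_cases h : i < lines.length
  · rw [List.drop_eq_getElem_cons h]
    rw [List.findIdx?_cons]
    by_cases hp : (PySem.Str.strip lines[i] == hdr) = true
    · simp [pvFindA, hp]
    · simp only [pvFindA, hp, if_false, Bool.false_eq_true, Option.map_map]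
      rw [pvFindA_drop lines hdr (i + 1)]
      congr 1
      funext t
      have h1 : i + 1 + t = i + (t + 1) := by omega
      simp [Function.comp, h1]
  · rw [List.drop_eq_nil_of_le (le_of_not_gt h)]
    simp [pvFindA]
termination_by lines.length - i

theorem pvScanB_ins (hdr : String) (block : List String) (xs : List String) :
    pvScanB hdr block xs false true = (xs, true) := by
  induction xs with
  | nil => rfl
  | cons l rest ih => simp [pvScanB, ih]

theorem pvScanB_skip (hdr : String) (block : List String) (xs : List String) :
    pvScanB hdr block xs true true =
      (xs.dropWhile (fun l => !(PySem.Str.startswith (PySem.Str.strip l) "[")), true) := by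
  induction xs with
  | nil => rfl
  | cons l rest ih =>
    by_cases hq : (PySem.Str.startswith (PySem.Str.strip l) "[") = true
    all_goals simp at hq
    · simp [pvScanB, hq, pvScanB_ins]
    · simp [pvScanB, hq, ih]

theorem pvScanB_main (hdr : String) (block : List String) (xs : List String) :
    pvScanB hdr block xs false false =
      match xs.findIdx? (fun l => PySem.Str.strip l == hdr) with
      | none => (xs, false)
      | some s => (xs.take s ++ block ++
          ((xs.drop (s + 1)).dropWhile (fun l => !(PySem.Str.startswith (PySem.Str.strip l) "["))), true) := by
  induction xs with
  | nil => rfl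
  | cons l rest ih =>
    by_cases hp : (PySem.Str.strip l == hdr) = true
    · simp [pvScanB, hp, List.findIdx?_cons, pvScanB_skip]
    · rw [List.findIdx?_cons, if_neg hp]
      cases hfi : rest.findIdx? (fun l => PySem.Str.strip l == hdr) with
      | none =>
        rw [hfi] at ih
        simp [pvScanB, hp, ih]
      | some s =>
        rw [hfi] at ih
        simp [pvScanB, hp, ih]

-- ===== VERDICT (by name: the statement is the Claim_ definition above) =====
theorem upsert_section_py_spec : Claim_equal_upsert_section_py := by
  intro text section_ items _
  simp only [Spec_upsert_section_py, upsert_section_py, upsert_section_py_alt]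
  have hf := pvFindA_drop (PySem.Str.splitlines text) ("[" ++ section_ ++ "]") 0
  have hs := pvScanB_main ("[" ++ section_ ++ "]")
      (("[" ++ section_ ++ "]") :: items.map (fun kv => kv.1 ++ " = " ++ kv.2))
      (PySem.Str.splitlines text)
  rw [List.drop_zero] at hf
  cases hfi : (PySem.Str.splitlines text).findIdx? (fun l => PySem.Str.strip l == ("[" ++ section_ ++ "]")) with
  | none =>
    rw [hfi] at hf hs
    simp only [Option.map_none] at hf
    simp [hf, hs]
  | some s =>
    rw [hfi] at hf hs
    simp only [Option.map_some, Nat.zero_add] at hf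
    simp [hf, hs, pvWEnd_drop]
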